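-- pv_equiv track=rewrite | github.com/deadlytoah/mvp | flashcard.py | _find_all_delimiters
-- ===== SOURCE A (Python) =====
-- def _find_all_delimiters(text, delimiters):
--     indicies = []
--     for delim in delimiters:
--         index = text.find(delim, 0)
--         while index >= 0:
--             indicies.append(index)
--             start = index
--             index = text.find(delim, start + 1)
--     return indicies
-- ===== SOURCE B (Python) =====
-- def _find_all_delimiters(text, delimiters):
--     n = len(text)
--     indicies = []
--     for delim in delimiters:
--         indicies.extend(i for i in range(n + 1) if text.startswith(delim, i))
--     return indicies
-- ===== Notes on version B (the rewrite author's own statement) =====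
-- stated objective: alternative
-- what changed: Replaces A's str.find jump-to-next-hit while-loop with a direct scan that tests every candidate position i in range(len(text)+1) with text.startswith(delim, i), keeping the per-delimiter grouped order.
import Mathlib
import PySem

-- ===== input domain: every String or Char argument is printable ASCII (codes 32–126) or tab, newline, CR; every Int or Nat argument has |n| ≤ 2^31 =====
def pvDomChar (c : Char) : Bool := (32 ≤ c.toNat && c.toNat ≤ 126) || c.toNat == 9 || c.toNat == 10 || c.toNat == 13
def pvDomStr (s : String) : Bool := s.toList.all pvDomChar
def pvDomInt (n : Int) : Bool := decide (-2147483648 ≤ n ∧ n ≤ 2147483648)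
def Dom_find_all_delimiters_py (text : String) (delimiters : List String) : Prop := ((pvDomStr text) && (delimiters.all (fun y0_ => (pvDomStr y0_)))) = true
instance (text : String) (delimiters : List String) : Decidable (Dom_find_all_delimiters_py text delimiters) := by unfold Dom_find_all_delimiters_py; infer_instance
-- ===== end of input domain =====

-- B replaces A's str.find jump-to-next-hit while-loop with a direct test of every candidate position; same output, same order (alternative decomposition, no speed claim).

-- ===== PORT A =====
-- A's inner 'while index >= 0' loop; fuel = len(text)+2 always suffices (the found index
-- strictly increases and is bounded by len(text)), so the port computes exactly A's loop.
def pvLoopA (cs d : List Char) : Nat → Int → List Int → List Int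
  | 0, _, acc => acc
  | fuel + 1, index, acc =>
    if 0 ≤ index then
      pvLoopA cs d fuel (PySem.Chars.findFrom cs d (index + 1)) (acc ++ [index])
    else acc

def find_all_delimiters_py (text : String) (delimiters : List String) : List Int :=
  delimiters.foldl
    (fun acc delim =>
      pvLoopA text.toList delim.toList (text.toList.length + 2)
        (PySem.Chars.findFrom text.toList delim.toList 0) acc)
    []

-- ===== PORT B =====
-- 'text.startswith(delim, i)' for 0 ≤ i ≤ len(text) is exactly: delim is a prefix of text[i:].
def find_all_delimiters_py_alt (text : String) (delimiters : List String) : List Int :=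
  delimiters.foldl
    (fun acc delim =>
      acc ++ (PySem.List.pyRange 0 ((text.toList.length : Int) + 1) 1).filter
        (fun i => PySem.Chars.startswith (text.toList.drop i.toNat) delim.toList))
    []

-- ===== PRECONDITION & SPEC =====
def Spec_find_all_delimiters_py (text : String) (delimiters : List String) (out : List Int) : Prop := out = find_all_delimiters_py_alt text delimiters
instance (text : String) (delimiters : List String) (out : List Int) : Decidable (Spec_find_all_delimiters_py text delimiters out) := by unfold Spec_find_all_delimiters_py; infer_instance

-- ===== CLAIM (what is proved, stated in full; the proofs are below) =====
def Claim_equal_find_all_delimiters_py : Prop := ∀ (text : String) (delimiters : List String), Dom_find_all_delimiters_py text delimiters → Spec_find_all_delimiters_py text delimiters (find_all_delimiters_py text delimiters)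

-- ===== LEMMAS AND PROOFS =====

-- CPython's find with a start past len(text) returns -1 (even for the empty needle).
lemma findFrom_past_len (s sub : List Char) (k : Int) (h : (s.length : Int) < k) :
    PySem.Chars.findFrom s sub k = -1 := by
  simp only [PySem.Chars.findFrom]
  rw [if_pos]
  split_ifs with h1 h2 <;> omega

-- a prefix of a later suffix is an infix of an earlier one
lemma prefix_drop_infix (d cs : List Char) (k i : Nat) (hk : k ≤ i)
    (h : d <+: cs.drop i) : d <:+: cs.drop k := by
  have : cs.drop i = (cs.drop k).drop (i - k) := by
    rw [List.drop_drop]; congr 1; omega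
  rw [this] at h
  exact h.isInfix.trans (List.drop_suffix _ _).isInfix

-- the filtered range is empty when no position in [k, len] carries the needle
lemma filter_range_nil (cs d : List Char) (k : Nat) (hnone : ¬ d <:+: cs.drop k) :
    (PySem.List.pyRange (k : Int) ((cs.length : Int) + 1) 1).filter
      (fun i => PySem.Chars.startswith (cs.drop i.toNat) d) = [] := by
  rw [List.filter_eq_nil_iff]
  intro i hi
  rw [PySem.List.mem_pyRange_one] at hi
  simp only [Bool.not_eq_true]
  rw [← Bool.not_eq_true, PySem.Chars.startswith_iff]
  intro hpre
  exact hnone (prefix_drop_infix d cs k i.toNat (by omega) hpre)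

-- main loop invariant: starting the find-loop at position k collects exactly the
-- positions in [k, len] at which d occurs, in increasing order
lemma loopA_eq (cs d : List Char) : ∀ (fuel k : Nat) (acc : List Int),
    k ≤ cs.length + 1 → cs.length + 2 - k ≤ fuel →
    pvLoopA cs d fuel (PySem.Chars.findFrom cs d (k : Int)) acc =
      acc ++ (PySem.List.pyRange (k : Int) ((cs.length : Int) + 1) 1).filter
        (fun i => PySem.Chars.startswith (cs.drop i.toNat) d) := by
  intro fuel
  induction fuel with
  | zero => intro k acc hk hf; omega
  | succ fuel ih =>
    intro k acc hk hf
    by_cases hend : k = cs.length + 1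
    · subst hend
      rw [findFrom_past_len cs d _ (by push_cast; omega)]
      rw [PySem.List.pyRange_one_eq_nil (by push_cast; omega)]
      simp [pvLoopA]
    · have hkle : k ≤ cs.length := by omega
      by_cases hm : PySem.Chars.findFrom cs d (k : Int) = -1
      · rw [hm]
        have hnone := (PySem.Chars.findFrom_natCast_eq_neg_one_iff cs d k hkle).mp hm
        rw [filter_range_nil cs d k hnone]
        simp [pvLoopA]
      · obtain ⟨hge, hpre, hfirst⟩ := PySem.Chars.findFrom_natCast_spec cs d k hkle hm
        set m : Int := PySem.Chars.findFrom cs d (k : Int) with hmdef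
        have hm0 : (0 : Int) ≤ m := by omega
        have hmle : m ≤ cs.length := by
          rw [hmdef, PySem.Chars.findFrom_natCast cs d k hkle]
          have := PySem.Chars.find_le_length (cs.drop k) d
          split_ifs <;> simp_all <;> try omega
        have hmnat : (m.toNat : Int) = m := Int.toNat_of_nonneg hm0
        -- unfold one step of the loop
        rw [pvLoopA, if_pos hm0]
        -- split the range at m and m+1
        have hsplit1 : PySem.List.pyRange (k : Int) ((cs.length : Int) + 1) 1 =
            PySem.List.pyRange (k : Int) m 1 ++ PySem.List.pyRange m ((cs.length : Int) + 1) 1 :=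
          PySem.List.pyRange_one_append _ _ _ hge (by omega)
        have hsplit2 : PySem.List.pyRange m ((cs.length : Int) + 1) 1 =
            m :: PySem.List.pyRange (m + 1) ((cs.length : Int) + 1) 1 :=
          PySem.List.pyRange_one_cons (by omega)
        rw [hsplit1, hsplit2, List.filter_append]
        -- the part [k, m) filters to []
        have hlow : (PySem.List.pyRange (k : Int) m 1).filter
            (fun i => PySem.Chars.startswith (cs.drop i.toNat) d) = [] := by
          rw [List.filter_eq_nil_iff]
          intro i hi
          rw [PySem.List.mem_pyRange_one] at hi
          simp only [Bool.not_eq_true]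
          rw [← Bool.not_eq_true, PySem.Chars.startswith_iff]
          intro hp
          exact hfirst i.toNat (by omega) (by omega) hp
        -- m itself is kept
        have hhit : PySem.Chars.startswith (cs.drop m.toNat) d = true :=
          (PySem.Chars.startswith_iff _ _).mpr hpre
        rw [List.filter_cons, if_pos hhit, hlow]
        -- recurse from m+1
        have hrec := ih (m.toNat + 1) (acc ++ [m]) (by omega) (by omega)
        rw [show ((m.toNat + 1 : Nat) : Int) = m + 1 by omega] at hrec
        rw [hrec]
        simp


-- ===== VERDICT (by name: the statement is the Claim_ definition above) =====
theorem find_all_delimiters_py_spec : Claim_equal_find_all_delimiters_py := by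
  intro text delimiters _
  unfold Spec_find_all_delimiters_py find_all_delimiters_py find_all_delimiters_py_alt
  congr 1
  funext acc delim
  have h := loopA_eq text.toList delim.toList (text.toList.length + 2) 0 acc
    (by omega) (by omega)
  simpa using h
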